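-- pv_equiv track=rewrite | github.com/samuelbraun04/Instrumentator | SamplePackGenerator.py | change_probability_of_next_note
-- ===== SOURCE A (Python) =====
-- def change_probability_of_next_note(x, numbers):
--     # Sort the list to make it easier to find closest numbers
--     sorted_numbers = sorted(set(numbers))  # Remove duplicates to handle multiplication correctly
--
--     # Separate numbers into those above and below x
--     above_x = [num for num in sorted_numbers if num > x]
--     below_x = [num for num in sorted_numbers if num < x]
--
--     # Identify the closest and second closest numbers above x
--     closest_above = above_x[0] if above_x else None
--     second_closest_above = above_x[1] if len(above_x) > 1 else None
--
--     # Identify the closest and second closest numbers below x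
--     closest_below = below_x[-1] if below_x else None
--     second_closest_below = below_x[-2] if len(below_x) > 1 else None
--
--     # Modify the original list based on the rules
--     modified_list = []
--     for num in numbers:
--         if num == closest_above or num == closest_below:
--             modified_list.extend([num] * 3)  # Triple the number of elements
--         elif num == second_closest_above or num == second_closest_below:
--             modified_list.extend([num] * 2)  # Double the number of elements
--         else:
--             modified_list.append(num)  # Keep other elements unchanged
--
--     return modified_list
-- ===== SOURCE B (Python) =====
-- def change_probability_of_next_note(x, numbers):
--     # Linear scans (no sort): the two nearest distinct values above and below x.
--     above = [n for n in numbers if n > x]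
--     a1 = min(above) if above else None                      # closest above x
--     above2 = [n for n in above if n > a1] if above else []
--     a2 = min(above2) if above2 else None                    # second closest above
--     below = [n for n in numbers if n < x]
--     b1 = max(below) if below else None                      # closest below x
--     below2 = [n for n in below if n < b1] if below else []
--     b2 = max(below2) if below2 else None                    # second closest below
--     return [v
--             for num in numbers
--             for v in [num] * (3 if (num == a1 or num == b1) else
--                               2 if (num == a2 or num == b2) else 1)]
-- ===== Notes on version B (the rewrite author's own statement) =====
-- stated objective: alternative
-- what changed: B drops A's sorted(set(numbers)) and positional indexing and instead finds the two nearest distinct values above and below x by direct linear min/max scans, then emits the output as one flat comprehension of replicated elements.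
import Mathlib
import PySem

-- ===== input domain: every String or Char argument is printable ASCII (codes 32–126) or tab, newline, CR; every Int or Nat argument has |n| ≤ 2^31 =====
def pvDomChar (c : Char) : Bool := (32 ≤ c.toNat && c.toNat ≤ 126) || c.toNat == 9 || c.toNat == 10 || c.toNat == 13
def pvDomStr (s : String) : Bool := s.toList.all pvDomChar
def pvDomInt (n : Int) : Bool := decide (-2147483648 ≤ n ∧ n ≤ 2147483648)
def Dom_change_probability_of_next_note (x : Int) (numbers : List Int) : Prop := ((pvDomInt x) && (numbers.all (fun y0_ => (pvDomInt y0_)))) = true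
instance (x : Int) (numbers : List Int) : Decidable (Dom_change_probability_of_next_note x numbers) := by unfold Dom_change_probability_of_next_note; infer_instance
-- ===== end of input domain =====

-- B replaces A's sort-the-deduplicated-list approach by direct linear min/max scans for the
-- two nearest distinct values above and below x (objective: alternative).

-- ===== PORT A =====
def change_probability_of_next_note (x : Int) (numbers : List Int) : List Int :=
  -- sorted_numbers = sorted(set(numbers))
  let sorted_numbers := PySem.List.sorted (PySem.Set.ofList numbers) (fun n => n) false
  let above_x := sorted_numbers.filter (fun num => decide (num > x))
  let below_x := sorted_numbers.filter (fun num => decide (num < x))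
  -- above_x[0] if above_x else None
  let closest_above := if above_x ≠ [] then PySem.List.pyGet? above_x 0 else none
  -- above_x[1] if len(above_x) > 1 else None
  let second_closest_above := if above_x.length > 1 then PySem.List.pyGet? above_x 1 else none
  -- below_x[-1] if below_x else None
  let closest_below := if below_x ≠ [] then PySem.List.pyGet? below_x (-1) else none
  -- below_x[-2] if len(below_x) > 1 else None
  let second_closest_below := if below_x.length > 1 then PySem.List.pyGet? below_x (-2) else none
  numbers.foldl (fun modified_list num =>
    if closest_above = some num ∨ closest_below = some num then
      modified_list ++ PySem.List.pyRepeat [num] 3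
    else if second_closest_above = some num ∨ second_closest_below = some num then
      modified_list ++ PySem.List.pyRepeat [num] 2
    else
      modified_list ++ [num]) []

-- ===== PORT B =====
def change_probability_of_next_note_alt (x : Int) (numbers : List Int) : List Int :=
  let above := numbers.filter (fun n => decide (n > x))
  -- min(above) if above else None
  let a1 := PySem.List.min? above (fun y => y)
  let above2 := match a1 with
    | some a => above.filter (fun n => decide (n > a))
    | none => ([] : List Int)
  let a2 := PySem.List.min? above2 (fun y => y)
  let below := numbers.filter (fun n => decide (n < x))
  -- max(below) if below else None
  let b1 := PySem.List.max? below (fun y => y)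
  let below2 := match b1 with
    | some b => below.filter (fun n => decide (n < b))
    | none => ([] : List Int)
  let b2 := PySem.List.max? below2 (fun y => y)
  numbers.flatMap (fun num =>
    List.replicate (if a1 = some num ∨ b1 = some num then 3
      else if a2 = some num ∨ b2 = some num then 2 else 1) num)

-- ===== PRECONDITION & SPEC =====
def Spec_change_probability_of_next_note (x : Int) (numbers : List Int) (out : List Int) : Prop := out = change_probability_of_next_note_alt x numbers
instance (x : Int) (numbers : List Int) (out : List Int) : Decidable (Spec_change_probability_of_next_note x numbers out) := by unfold Spec_change_probability_of_next_note; infer_instance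

-- ===== CLAIM (what is proved, stated in full; the proofs are below) =====
def Claim_equal_change_probability_of_next_note : Prop := ∀ (x : Int) (numbers : List Int), Dom_change_probability_of_next_note x numbers → Spec_change_probability_of_next_note x numbers (change_probability_of_next_note x numbers)

-- ===== LEMMAS AND PROOFS =====

-- min/max over Int with the identity key are determined by the element set.
lemma min_id_spec (M : List Int) (m : Int) (hmem : m ∈ M) (hmin : ∀ y ∈ M, m ≤ y) :
    PySem.List.min? M (fun y => y) = some m := by
  cases h : PySem.List.min? M (fun y => y) with
  | none =>
      rw [PySem.List.min?_eq_none_iff] at h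
      subst h; simp at hmem
  | some m' =>
      have h1 := PySem.List.min?_mem h
      have h2 : m' ≤ m := PySem.List.min?_isMin h m hmem
      have h3 : m ≤ m' := hmin m' h1
      have : m' = m := le_antisymm h2 h3
      rw [this]

lemma max_id_spec (M : List Int) (m : Int) (hmem : m ∈ M) (hmax : ∀ y ∈ M, y ≤ m) :
    PySem.List.max? M (fun y => y) = some m := by
  cases h : PySem.List.max? M (fun y => y) with
  | none =>
      rw [PySem.List.max?_eq_none_iff] at h
      subst h; simp at hmem
  | some m' =>
      have h1 := PySem.List.max?_mem h
      have h2 : m ≤ m' := PySem.List.max?_isMax h m hmem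
      have h3 : m' ≤ m := hmax m' h1
      have : m' = m := le_antisymm h3 h2
      rw [this]

-- head of a strictly increasing enumeration of M's elements = min(M)
lemma head_min (L M : List Int) (hp : L.Pairwise (· < ·)) (hm : ∀ n, n ∈ L ↔ n ∈ M) :
    L.head? = PySem.List.min? M (fun y => y) := by
  cases L with
  | nil =>
      have hM : M = [] := List.eq_nil_iff_forall_not_mem.2 fun n hn => by
        have := (hm n).2 hn; simp at this
      rw [hM]; rfl
  | cons a t =>
      have hmem : a ∈ M := (hm a).1 (by simp)
      have hmin : ∀ y ∈ M, a ≤ y := by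
        intro y hy
        rcases List.mem_cons.1 ((hm y).2 hy) with h | h
        · exact le_of_eq h.symm
        · exact le_of_lt ((List.pairwise_cons.1 hp).1 y h)
      rw [min_id_spec M a hmem hmin]; rfl

-- head of a strictly decreasing enumeration of M's elements = max(M)
lemma head_max (L M : List Int) (hp : L.Pairwise (fun p q => q < p)) (hm : ∀ n, n ∈ L ↔ n ∈ M) :
    L.head? = PySem.List.max? M (fun y => y) := by
  cases L with
  | nil =>
      have hM : M = [] := List.eq_nil_iff_forall_not_mem.2 fun n hn => by
        have := (hm n).2 hn; simp at this
      rw [hM]; rfl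
  | cons a t =>
      have hmem : a ∈ M := (hm a).1 (by simp)
      have hmax : ∀ y ∈ M, y ≤ a := by
        intro y hy
        rcases List.mem_cons.1 ((hm y).2 hy) with h | h
        · exact le_of_eq h
        · exact le_of_lt ((List.pairwise_cons.1 hp).1 y h)
      rw [max_id_spec M a hmem hmax]; rfl

-- xs[-2] is the second element of the reversed list
lemma pyGet_neg_two (xs : List Int) : PySem.List.pyGet? xs (-2) = xs.reverse[1]? := by
  by_cases h : 2 ≤ xs.length
  · rw [PySem.List.pyGet?_neg_ofNat xs 2 (by norm_num) h]
    rw [List.getElem?_reverse (by omega)]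
    congr 1
  · rw [(PySem.List.pyGet?_eq_none_iff _ _).2, (List.getElem?_eq_none_iff).2 (by simp; omega)]
    simp [PySem.Raise.InRange]; omega

-- A's "first element above x" (head of sorted distinct) = B's min scan
lemma closest_eq_min (L M : List Int) (hp : L.Pairwise (· < ·)) (hm : ∀ n, n ∈ L ↔ n ∈ M) :
    (if L ≠ [] then PySem.List.pyGet? L 0 else none) = PySem.List.min? M (fun y => y) := by
  by_cases hL : L = []
  · have hM : M = [] := List.eq_nil_iff_forall_not_mem.2 fun n hn => by
      have := (hm n).2 hn; rw [hL] at this; simp at this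
    rw [hM]; simp [hL]; rfl
  · simp only [hL, ne_eq, not_false_iff, if_pos]
    rw [PySem.List.pyGet?_zero, ← List.head?_eq_getElem?]
    exact head_min L M hp hm

-- A's "last element below x" = B's max scan
lemma closest_eq_max (L M : List Int) (hp : L.Pairwise (· < ·)) (hm : ∀ n, n ∈ L ↔ n ∈ M) :
    (if L ≠ [] then PySem.List.pyGet? L (-1) else none) = PySem.List.max? M (fun y => y) := by
  by_cases hL : L = []
  · have hM : M = [] := List.eq_nil_iff_forall_not_mem.2 fun n hn => by
      have := (hm n).2 hn; rw [hL] at this; simp at this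
    rw [hM]; simp [hL]; rfl
  · simp only [hL, ne_eq, not_false_iff, if_pos]
    rw [PySem.List.pyGet?_neg_one, ← List.head?_reverse]
    refine head_max L.reverse M (List.pairwise_reverse.2 hp) fun n => ?_
    rw [List.mem_reverse]; exact hm n

-- A's second element above x = B's min over the elements above the first min
lemma second_eq_min (L M : List Int) (hp : L.Pairwise (· < ·)) (hm : ∀ n, n ∈ L ↔ n ∈ M) :
    (if L.length > 1 then PySem.List.pyGet? L 1 else none) =
    PySem.List.min? (match PySem.List.min? M (fun y => y) with
      | some a => M.filter (fun n => decide (n > a))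
      | none => ([] : List Int)) (fun y => y) := by
  cases L with
  | nil =>
      have hM : M = [] := List.eq_nil_iff_forall_not_mem.2 fun n hn => by
        have := (hm n).2 hn; simp at this
      rw [hM]; rfl
  | cons a t =>
      have ha : PySem.List.min? M (fun y => y) = some a := by
        rw [← head_min (a :: t) M hp hm]; rfl
      rw [ha]
      cases t with
      | nil =>
          simp only [List.length_cons, List.length_nil, gt_iff_lt, show ¬(1 < 0 + 1) by omega, if_false]
          rw [eq_comm, PySem.List.min?_eq_none_iff]
          refine List.filter_eq_nil_iff.2 fun n hn => ?_
          have : n = a := by have := (hm n).2 hn; simpa using this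
          simp [this]
      | cons b t' =>
          have hguard : (a :: b :: t').length > 1 := by simp
          rw [if_pos hguard]
          have hab : a < b := (List.pairwise_cons.1 hp).1 b (by simp)
          have h1 : PySem.List.pyGet? (a :: b :: t') 1 = some b := by
            rw [show (1 : Int) = ((0 : Nat) : Int) + 1 by norm_num,
              PySem.List.pyGet?_cons_succ, PySem.List.pyGet?_natCast]
            rfl
          rw [h1, eq_comm]
          refine min_id_spec _ b (List.mem_filter.2 ⟨(hm b).1 (by simp), by simpa using hab⟩) ?_
          intro y hy
          obtain ⟨hyM, hay⟩ := List.mem_filter.1 hy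
          have hay' : a < y := by simpa using hay
          rcases List.mem_cons.1 ((hm y).2 hyM) with h | h
          · omega
          · rcases List.mem_cons.1 h with h' | h'
            · exact le_of_eq h'.symm
            · exact le_of_lt ((List.pairwise_cons.1 (List.pairwise_cons.1 hp).2).1 y h')

-- A's second-to-last element below x = B's max over the elements below the first max
lemma second_eq_max (L M : List Int) (hp : L.Pairwise (· < ·)) (hm : ∀ n, n ∈ L ↔ n ∈ M) :
    (if L.length > 1 then PySem.List.pyGet? L (-2) else none) =
    PySem.List.max? (match PySem.List.max? M (fun y => y) with
      | some b => M.filter (fun n => decide (n < b))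
      | none => ([] : List Int)) (fun y => y) := by
  have hR : L.reverse.Pairwise (fun p q => q < p) := List.pairwise_reverse.2 hp
  have hmR : ∀ n, n ∈ L.reverse ↔ n ∈ M := fun n => by rw [List.mem_reverse]; exact hm n
  have hlen : L.length = L.reverse.length := (List.length_reverse).symm
  rw [pyGet_neg_two, hlen]
  cases hRc : L.reverse with
  | nil =>
      have hM : M = [] := List.eq_nil_iff_forall_not_mem.2 fun n hn => by
        have := (hmR n).2 hn; rw [hRc] at this; simp at this
      rw [hM]; rfl
  | cons a t =>
      rw [hRc] at hR hmR
      have ha : PySem.List.max? M (fun y => y) = some a := by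
        rw [← head_max (a :: t) M hR hmR]; rfl
      rw [ha]
      cases t with
      | nil =>
          simp only [List.length_cons, List.length_nil, gt_iff_lt, show ¬(1 < 0 + 1) by omega, if_false]
          rw [eq_comm, PySem.List.max?_eq_none_iff]
          refine List.filter_eq_nil_iff.2 fun n hn => ?_
          have : n = a := by have := (hmR n).2 hn; simpa using this
          simp [this]
      | cons b t' =>
          have hguard : (a :: b :: t').length > 1 := by simp
          rw [if_pos hguard]
          have hab : b < a := (List.pairwise_cons.1 hR).1 b (by simp)
          have h1 : (a :: b :: t')[1]? = some b := rfl
          rw [h1, eq_comm]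
          refine max_id_spec _ b (List.mem_filter.2 ⟨(hmR b).1 (by simp), by simpa using hab⟩) ?_
          intro y hy
          obtain ⟨hyM, hya⟩ := List.mem_filter.1 hy
          have hya' : y < a := by simpa using hya
          rcases List.mem_cons.1 ((hmR y).2 hyM) with h | h
          · omega
          · rcases List.mem_cons.1 h with h' | h'
            · exact le_of_eq h'
            · exact le_of_lt ((List.pairwise_cons.1 (List.pairwise_cons.1 hR).2).1 y h')

-- once the four option values agree, A's append loop is B's flatMap of replicates
lemma loop_eq_flatMap (numbers : List Int) (a1 a2 b1 b2 : Option Int) :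
    numbers.foldl (fun modified_list num =>
      if a1 = some num ∨ b1 = some num then
        modified_list ++ PySem.List.pyRepeat [num] 3
      else if a2 = some num ∨ b2 = some num then
        modified_list ++ PySem.List.pyRepeat [num] 2
      else
        modified_list ++ [num]) [] =
    numbers.flatMap (fun num =>
      List.replicate (if a1 = some num ∨ b1 = some num then 3
        else if a2 = some num ∨ b2 = some num then 2 else 1) num) := by
  have hfun : (fun (modified_list : List Int) (num : Int) =>
      if a1 = some num ∨ b1 = some num then
        modified_list ++ PySem.List.pyRepeat [num] 3
      else if a2 = some num ∨ b2 = some num then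
        modified_list ++ PySem.List.pyRepeat [num] 2
      else
        modified_list ++ [num]) =
      (fun modified_list num => modified_list ++
        (fun num => if a1 = some num ∨ b1 = some num then PySem.List.pyRepeat [num] 3
          else if a2 = some num ∨ b2 = some num then PySem.List.pyRepeat [num] 2
          else [num]) num) := by
    funext acc num; beta_reduce; split_ifs <;> rfl
  rw [hfun, PySem.List.foldl_append_eq_flatMap, List.nil_append]
  congr 1
  funext num
  split_ifs <;> simp [PySem.List.pyRepeat_singleton]

-- membership transfer: filtering sorted(set(numbers)) has the same members as filtering numbers
lemma mem_filter_sorted (numbers : List Int) (p : Int → Bool) (n : Int) :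
    n ∈ (PySem.List.sorted (PySem.Set.ofList numbers) (fun n => n) false).filter p ↔
    n ∈ numbers.filter p := by
  simp [List.mem_filter, PySem.List.mem_sorted, PySem.Set.mem_ofList]

lemma filter_sorted_pairwise (numbers : List Int) (p : Int → Bool) :
    ((PySem.List.sorted (PySem.Set.ofList numbers) (fun n => n) false).filter p).Pairwise (· < ·) :=
  List.Pairwise.sublist List.filter_sublist (PySem.List.sorted_ofList_pairwise_lt numbers)

-- ===== VERDICT (by name: the statement is the Claim_ definition above) =====
theorem change_probability_of_next_note_spec : Claim_equal_change_probability_of_next_note := by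
  intro x numbers _
  unfold Spec_change_probability_of_next_note
  unfold change_probability_of_next_note change_probability_of_next_note_alt
  simp only []
  rw [closest_eq_min _ _ (filter_sorted_pairwise numbers _) (mem_filter_sorted numbers _),
    second_eq_min _ _ (filter_sorted_pairwise numbers _) (mem_filter_sorted numbers _),
    closest_eq_max _ _ (filter_sorted_pairwise numbers _) (mem_filter_sorted numbers _),
    second_eq_max _ _ (filter_sorted_pairwise numbers _) (mem_filter_sorted numbers _)]
  exact loop_eq_flatMap numbers _ _ _ _
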